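-- pv_equiv track=rewrite | github.com/PynutCommander/FTP-Change-Notifier | test.py | clear_Meta
-- ===== SOURCE A (Python) =====
-- def clear_Meta(Files_In_Dir):
--     counter = 0
--     while counter in range(len(Files_In_Dir)):
--         if (".meta" in (Files_In_Dir[counter])):
--             del Files_In_Dir[counter]
--             counter -= 1
--         counter += 1
--     return Files_In_Dir
-- ===== SOURCE B (Python) =====
-- def clear_Meta(Files_In_Dir):
--     w = 0
--     for r in range(len(Files_In_Dir)):
--         if ".meta" not in Files_In_Dir[r]:
--             Files_In_Dir[w] = Files_In_Dir[r]
--             w += 1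
--     del Files_In_Dir[w:]
--     return Files_In_Dir
-- ===== Notes on version B (the rewrite author's own statement) =====
-- stated objective: faster
-- what changed: Replace A's delete-at-index-and-backtrack while loop with an in-place two-pointer compaction: one forward pass copies kept elements to a write index and a single final truncation removes the tail, so no mid-scan list deletion (which shifts the tail) ever happens.
import Mathlib
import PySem

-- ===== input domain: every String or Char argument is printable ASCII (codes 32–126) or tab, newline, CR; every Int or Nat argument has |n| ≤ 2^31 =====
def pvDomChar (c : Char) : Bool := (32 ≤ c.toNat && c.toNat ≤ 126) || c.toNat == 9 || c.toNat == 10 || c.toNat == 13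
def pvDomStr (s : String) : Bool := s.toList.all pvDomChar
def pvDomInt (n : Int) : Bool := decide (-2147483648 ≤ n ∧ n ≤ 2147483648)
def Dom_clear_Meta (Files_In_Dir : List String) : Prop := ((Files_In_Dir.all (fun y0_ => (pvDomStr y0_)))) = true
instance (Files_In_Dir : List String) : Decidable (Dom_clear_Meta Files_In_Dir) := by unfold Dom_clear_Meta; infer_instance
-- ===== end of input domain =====

-- B replaces A's delete-at-index-with-backtrack while loop by an in-place two-pointer
-- compaction (forward copy of kept elements, then one final truncation); return values are
-- proved equal. Both Pythons mutate the argument list in place in the same observable way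
-- (the returned list is the argument object); the equivalence proved here is about the value.

-- ===== PORT A =====
-- while counter in range(len(xs)): if ".meta" in xs[counter]: del xs[counter]; counter -= 1; counter += 1
def clear_MetaGo (xs : List String) (counter : Int) : List String :=
  if h : 0 ≤ counter ∧ counter < xs.length then
    if PySem.Str.isIn ".meta" (PySem.List.pyGetD xs counter "") then
      clear_MetaGo (xs.eraseIdx counter.toNat) (counter - 1 + 1)
    else
      clear_MetaGo xs (counter + 1)
  else xs
termination_by (xs.length - counter.toNat : Nat)
decreasing_by
  · have h1 : counter.toNat < xs.length := by omega
    simp only [List.length_eraseIdx, if_pos h1]; omega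
  · omega

def clear_Meta (Files_In_Dir : List String) : List String :=
  clear_MetaGo Files_In_Dir 0

-- ===== PORT B =====
-- w = 0; for r in range(len(lst)): if ".meta" not in lst[r]: lst[w] = lst[r]; w += 1
-- del lst[w:]  (= take w)
def clear_Meta_altGo (n : Nat) (lst : List String) (w : Nat) (r : Nat) : List String × Nat :=
  if r < n then
    if PySem.Str.isIn ".meta" (PySem.List.pyGetD lst (r : Int) "") = false then
      clear_Meta_altGo n (lst.set w (PySem.List.pyGetD lst (r : Int) "")) (w + 1) (r + 1)
    else
      clear_Meta_altGo n lst w (r + 1)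
  else (lst, w)
termination_by n - r

def clear_Meta_alt (Files_In_Dir : List String) : List String :=
  let st := clear_Meta_altGo Files_In_Dir.length Files_In_Dir 0 0
  st.1.take st.2

-- ===== PRECONDITION & SPEC =====
def Spec_clear_Meta (Files_In_Dir : List String) (out : List String) : Prop := out = clear_Meta_alt Files_In_Dir
instance (Files_In_Dir : List String) (out : List String) : Decidable (Spec_clear_Meta Files_In_Dir out) := by unfold Spec_clear_Meta; infer_instance

-- ===== CLAIM (what is proved, stated in full; the proofs are below) =====
def Claim_equal_clear_Meta : Prop := ∀ (Files_In_Dir : List String), Dom_clear_Meta Files_In_Dir → Spec_clear_Meta Files_In_Dir (clear_Meta Files_In_Dir)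

-- ===== LEMMAS AND PROOFS =====

-- the kept-element predicate both loops test
def pvKeep (s : String) : Bool := !PySem.Str.isIn ".meta" s

lemma take_app (xs ys : List String) (k : Nat) (h : k ≤ xs.length) :
    (xs.take k ++ ys).take k = xs.take k := by
  rw [List.take_append_of_le_length (by simp [h]), List.take_take]; simp

lemma drop_app (xs ys : List String) (k : Nat) (h : k ≤ xs.length) :
    (xs.take k ++ ys).drop k = ys := by
  rw [List.drop_append_of_le_length (by simp [h])]
  simp

lemma pyGetD_in_range (xs : List String) (c : Int) (hc : 0 ≤ c) (h : c.toNat < xs.length) :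
    PySem.List.pyGetD xs c "" = xs[c.toNat] := by
  obtain ⟨k, rfl⟩ : ∃ k : Nat, c = (k : Int) := ⟨c.toNat, by omega⟩
  rw [PySem.List.pyGetD_natCast]
  simp only [Int.toNat_natCast] at h ⊢
  simp [List.getD_eq_getElem?_getD, List.getElem?_eq_getElem h]

-- A's loop returns: the already-scanned (kept) prefix ++ the filter of the unscanned suffix
lemma clear_MetaGo_eq (xs : List String) (c : Int) :
    0 ≤ c → clear_MetaGo xs c = xs.take c.toNat ++ (xs.drop c.toNat).filter pvKeep := by
  induction xs, c using clear_MetaGo.induct with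
  | case1 xs c h hmeta ih =>
    intro hc
    have hk : c.toNat < xs.length := by omega
    have hc1 : c - 1 + 1 = c := by ring
    rw [clear_MetaGo, dif_pos h, if_pos hmeta, ih (by omega), hc1,
        List.eraseIdx_eq_take_drop_succ, take_app _ _ _ hk.le, drop_app _ _ _ hk.le]
    have hkeep : pvKeep xs[c.toNat] = false := by
      simp only [pvKeep, ← pyGetD_in_range xs c hc hk, hmeta, Bool.not_true]
    rw [List.drop_eq_getElem_cons hk, List.filter_cons, hkeep]
    simp
  | case2 xs c h hmeta ih =>
    intro hc
    have hk : c.toNat < xs.length := by omega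
    have h1 : (c + 1).toNat = c.toNat + 1 := by omega
    rw [clear_MetaGo, dif_pos h, if_neg hmeta, ih (by omega), h1]
    have hkeep : pvKeep xs[c.toNat] = true := by
      simp only [pvKeep, ← pyGetD_in_range xs c hc hk, hmeta, Bool.not_false]
    rw [List.drop_eq_getElem_cons hk, List.filter_cons, hkeep,
        show List.take (c.toNat+1) xs = List.take c.toNat xs ++ [xs[c.toNat]] from by
          rw [List.take_succ]; simp [List.getElem?_eq_getElem hk]]
    rw [List.append_assoc]
    rfl
  | case3 xs c h =>
    intro hc
    have hlen : xs.length ≤ c.toNat := by omega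
    rw [clear_MetaGo, dif_neg h]
    simp [List.take_of_length_le hlen, List.drop_of_length_le hlen]

lemma take_succ_filter (xs : List String) (r : Nat) (hr : r < xs.length) :
    (xs.take (r+1)).filter pvKeep
      = (xs.take r).filter pvKeep ++ if pvKeep xs[r] then [xs[r]] else [] := by
  rw [show xs.take (r+1) = xs.take r ++ [xs[r]] from by
        rw [List.take_succ]; simp [List.getElem?_eq_getElem hr],
      List.filter_append]
  by_cases h : pvKeep xs[r] <;> simp [h]

-- B's loop invariant: at read index r, the list is (kept part of the scanned prefix) followed
-- by the untouched tail of the original list, and w is the length of the kept part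
lemma clear_Meta_altGo_inv (xs : List String) :
    ∀ k r, xs.length - r ≤ k → r ≤ xs.length →
    clear_Meta_altGo xs.length
        ((xs.take r).filter pvKeep ++ xs.drop ((xs.take r).filter pvKeep).length)
        ((xs.take r).filter pvKeep).length r
      = (xs.filter pvKeep ++ xs.drop (xs.filter pvKeep).length, (xs.filter pvKeep).length) := by
  intro k
  induction k with
  | zero =>
    intro r hk hr
    have : r = xs.length := by omega
    subst this
    rw [clear_Meta_altGo, if_neg (by omega), List.take_length]
  | succ k ih =>
    intro r hk hr
    by_cases hrn : r < xs.length
    · set f := (xs.take r).filter pvKeep with hf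
      have hw : f.length ≤ r := le_trans (List.length_filter_le _ _) (List.length_take_le _ _)
      have hL : f.length ≤ xs.length := by omega
      have hget : PySem.List.pyGetD (f ++ xs.drop f.length) (r : Int) "" = xs[r] := by
        rw [pyGetD_in_range _ (r : Int) (by omega) (by simp; omega)]
        rw [List.getElem_append_right (by simpa using hw)]
        rw [List.getElem_drop]
        congr 1
        omega
      have hdropcons : xs.drop f.length = xs[f.length] :: xs.drop (f.length + 1) :=
        List.drop_eq_getElem_cons (by omega)
      rw [clear_Meta_altGo, if_pos hrn, hget]
      by_cases hkeep : pvKeep xs[r]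
      · rw [if_pos (by simpa [pvKeep] using hkeep)]
        have hf' : (xs.take (r+1)).filter pvKeep = f ++ [xs[r]] := by
          rw [take_succ_filter xs r hrn, if_pos hkeep, hf]
        have hset : (f ++ xs.drop f.length).set f.length xs[r]
            = (f ++ [xs[r]]) ++ xs.drop (f.length + 1) := by
          rw [List.set_append, if_neg (by omega), Nat.sub_self, hdropcons,
              List.set_cons_zero, List.append_assoc]
          rfl
        have := ih (r+1) (by omega) (by omega)
        rw [hf', List.length_append, List.length_singleton] at this
        rw [hset]
        convert this using 3
      · rw [if_neg (by simpa [pvKeep] using hkeep)]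
        have hf' : (xs.take (r+1)).filter pvKeep = f := by
          rw [take_succ_filter xs r hrn, if_neg hkeep, List.append_nil]
        have := ih (r+1) (by omega) (by omega)
        rwa [hf'] at this
    · have : r = xs.length := by omega
      subst this
      rw [clear_Meta_altGo, if_neg (by omega), List.take_length]

lemma clear_Meta_alt_eq (xs : List String) : clear_Meta_alt xs = xs.filter pvKeep := by
  have h := clear_Meta_altGo_inv xs xs.length 0 (by omega) (by omega)
  simp only [List.take_zero, List.filter_nil, List.length_nil, List.drop_zero,
    List.nil_append] at h
  rw [clear_Meta_alt, h]
  exact List.take_left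

-- ===== VERDICT (by name: the statement is the Claim_ definition above) =====
theorem clear_Meta_spec : Claim_equal_clear_Meta := by
  intro xs _
  show clear_Meta xs = clear_Meta_alt xs
  rw [clear_Meta_alt_eq, clear_Meta, clear_MetaGo_eq xs 0 le_rfl]
  simp
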